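-- pv_equiv track=rewrite | github.com/charlesvestal/sf2-to-opxy | src/sf2_to_opxy/selection.py | assign_key_ranges
-- ===== SOURCE A (Python) =====
-- from typing import Dict, List
--
-- Zone = Dict[str, object]
--
-- def assign_key_ranges(zones: List[Zone], key_min: int, key_max: int) -> List[Zone]:
--     zones_sorted = sorted(zones, key=lambda z: z.get("root_key", 60))
--     roots = [int(zone.get("root_key", 60)) for zone in zones_sorted]
--     for i, zone in enumerate(zones_sorted):
--         if i == 0:
--             low_key = key_min
--         else:
--             low_key = (roots[i - 1] + roots[i]) // 2 + 1
--         if i == len(roots) - 1: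
--             high_key = key_max
--         else:
--             high_key = (roots[i] + roots[i + 1]) // 2
--         zone["lokey"] = max(key_min, min(low_key, key_max))
--         zone["hikey"] = max(key_min, min(high_key, key_max))
--     return zones_sorted
-- ===== SOURCE B (Python) =====
-- def assign_key_ranges(zones, key_min, key_max):
--     def clamp(v):
--         return max(key_min, min(v, key_max))
--     zs = sorted(zones, key=lambda z: z.get("root_key", 60))
--     prev = None
--     lo = key_min
--     for cur in zs:
--         if prev is not None:
--             hi = (int(prev.get("root_key", 60)) + int(cur.get("root_key", 60))) // 2
--             prev["lokey"] = clamp(lo)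
--             prev["hikey"] = clamp(hi)
--             lo = hi + 1
--         prev = cur
--     if prev is not None:
--         prev["lokey"] = clamp(lo)
--         prev["hikey"] = clamp(key_max)
--     return zs
-- ===== Notes on version B (the rewrite author's own statement) =====
-- stated objective: alternative
-- what changed: Replaces A's indexed loop over a precomputed roots list (with i==0/i==len-1 branches and roots[i-1]/roots[i+1] lookups) by a single forward sweep over adjacent zone pairs that carries the next raw low boundary in an accumulator: each zone's hikey is the midpoint with its successor and its lokey is the previous hikey plus one, so no roots array or index arithmetic exists.
import Mathlib
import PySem

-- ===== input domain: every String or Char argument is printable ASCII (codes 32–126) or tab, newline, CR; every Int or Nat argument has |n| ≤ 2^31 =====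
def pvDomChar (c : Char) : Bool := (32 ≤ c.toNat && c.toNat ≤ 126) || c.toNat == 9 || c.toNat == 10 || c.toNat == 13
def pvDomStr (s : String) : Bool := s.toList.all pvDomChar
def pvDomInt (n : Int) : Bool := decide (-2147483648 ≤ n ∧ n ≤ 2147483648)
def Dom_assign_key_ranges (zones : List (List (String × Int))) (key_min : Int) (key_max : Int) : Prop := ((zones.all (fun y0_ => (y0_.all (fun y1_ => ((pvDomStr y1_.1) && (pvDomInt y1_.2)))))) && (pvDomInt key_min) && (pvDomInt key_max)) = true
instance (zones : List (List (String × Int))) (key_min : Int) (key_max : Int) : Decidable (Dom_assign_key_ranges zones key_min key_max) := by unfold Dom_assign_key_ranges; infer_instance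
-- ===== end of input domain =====

-- B replaces A's indexed loop over a roots array by a single forward sweep over adjacent zone
-- pairs carrying the next raw low boundary in an accumulator (objective: alternative, same cost).
-- Both A and B mutate the zone dicts in place in Python; the theorems are about the returned value.

-- ===== PORT A =====
-- z.get("root_key", 60) on a zone dict
def pvRootA (z : List (String × Int)) : Int := (PySem.Dict.mk z).getD "root_key" 60

def assign_key_ranges (zones : List (List (String × Int))) (key_min : Int) (key_max : Int) : List (List (String × Int)) :=
  let zones_sorted := PySem.List.sorted zones (fun z => pvRootA z) false
  let roots := zones_sorted.map (fun z => pvRootA z)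
  (PySem.List.enumerate zones_sorted 0).map (fun iz =>
    let i := iz.1
    let zone := iz.2
    let low_key := if i = 0 then key_min
      else PySem.Int.floordiv (PySem.List.pyGetD roots (i - 1) 0 + PySem.List.pyGetD roots i 0) 2 + 1
    let high_key := if i = (roots.length : Int) - 1 then key_max
      else PySem.Int.floordiv (PySem.List.pyGetD roots i 0 + PySem.List.pyGetD roots (i + 1) 0) 2
    (((PySem.Dict.mk zone).insert "lokey" (max key_min (min low_key key_max))).insert
        "hikey" (max key_min (min high_key key_max))).items)

-- ===== PORT B =====
-- zone["lokey"] = clamp(lo); zone["hikey"] = clamp(hi)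
def pvSetKeys (km kM : Int) (z : List (String × Int)) (lo hi : Int) : List (String × Int) :=
  (((PySem.Dict.mk z).insert "lokey" (max km (min lo kM))).insert
      "hikey" (max km (min hi kM))).items

-- the sweep: 'prev' is the zone awaiting its keys, 'lo' the raw low boundary carried forward
def pvSweep (km kM : Int) (lo : Int) (prev : List (String × Int)) :
    List (List (String × Int)) → List (List (String × Int))
  | [] => [pvSetKeys km kM prev lo kM]
  | cur :: rest =>
      let hi := PySem.Int.floordiv (pvRootA prev + pvRootA cur) 2
      pvSetKeys km kM prev lo hi :: pvSweep km kM (hi + 1) cur rest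

def assign_key_ranges_alt (zones : List (List (String × Int))) (key_min : Int) (key_max : Int) : List (List (String × Int)) :=
  match PySem.List.sorted zones (fun z => pvRootA z) false with
  | [] => []
  | z :: rest => pvSweep key_min key_max key_min z rest

-- ===== PRECONDITION & SPEC =====
def Spec_assign_key_ranges (zones : List (List (String × Int))) (key_min : Int) (key_max : Int) (out : List (List (String × Int))) : Prop := out = assign_key_ranges_alt zones key_min key_max
instance (zones : List (List (String × Int))) (key_min : Int) (key_max : Int) (out : List (List (String × Int))) : Decidable (Spec_assign_key_ranges zones key_min key_max out) := by unfold Spec_assign_key_ranges; infer_instance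

-- ===== CLAIM =====
def Claim_equal_assign_key_ranges : Prop := ∀ (zones : List (List (String × Int))) (key_min : Int) (key_max : Int), Dom_assign_key_ranges zones key_min key_max → Spec_assign_key_ranges zones key_min key_max (assign_key_ranges zones key_min key_max)

-- ===== LEMMAS AND PROOFS =====

-- root of the k-th zone (total; out-of-range value never used)
def pvRootAt (zs : List (List (String × Int))) (k : Nat) : Int := pvRootA (zs.getD k [])

theorem pvSweep_length (km kM lo : Int) (z : List (String × Int))
    (rest : List (List (String × Int))) :
    (pvSweep km kM lo z rest).length = rest.length + 1 := by
  induction rest generalizing lo z with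
  | nil => simp [pvSweep]
  | cons cur rest ih => simp [pvSweep, ih]

theorem pvSweep_getElem (km kM : Int) (rest : List (List (String × Int)))
    (z : List (String × Int)) (lo : Int) (j : Nat) (hj : j < rest.length + 1) :
    (pvSweep km kM lo z rest)[j]'(by rw [pvSweep_length]; exact hj) =
      pvSetKeys km kM ((z :: rest).getD j [])
        (if j = 0 then lo
         else PySem.Int.floordiv (pvRootAt (z :: rest) (j - 1) + pvRootAt (z :: rest) j) 2 + 1)
        (if j = rest.length then kM
         else PySem.Int.floordiv (pvRootAt (z :: rest) j + pvRootAt (z :: rest) (j + 1)) 2) := by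
  induction rest generalizing z lo j with
  | nil =>
    match j with
    | 0 => simp [pvSweep]
  | cons cur rest ih =>
    match j with
    | 0 => simp [pvSweep, pvRootAt]
    | (k + 1) =>
      have hk : k < rest.length + 1 := by simpa using hj
      show (pvSweep km kM (PySem.Int.floordiv (pvRootA z + pvRootA cur) 2 + 1) cur rest)[k]'(by
          rw [pvSweep_length]; exact hk) = _
      rw [ih cur _ k hk]
      have h1 : ∀ m : Nat, pvRootAt (cur :: rest) m = pvRootAt (z :: cur :: rest) (m + 1) := by
        intro m; simp [pvRootAt]
      by_cases hk0 : k = 0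
      · subst hk0
        cases rest <;> simp [pvRootAt]
      · have : (cur :: rest).getD k [] = (z :: cur :: rest).getD (k + 1) [] := by
          simp
        rw [this, h1 k, if_neg hk0, if_neg (by omega : ¬ k + 1 = 0)]
        have : k - 1 + 1 = k + 1 - 1 := by omega
        rw [h1 (k - 1), h1 (k + 1), this]
        simp [List.length_cons]

theorem mapA_eq_sweep (km kM : Int) (zs : List (List (String × Int))) :
    ((PySem.List.enumerate zs 0).map (fun iz =>
      let i := iz.1
      let zone := iz.2
      let low_key := if i = 0 then km
        else PySem.Int.floordiv (PySem.List.pyGetD (zs.map (fun z => pvRootA z)) (i - 1) 0 + PySem.List.pyGetD (zs.map (fun z => pvRootA z)) i 0) 2 + 1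
      let high_key := if i = ((zs.map (fun z => pvRootA z)).length : Int) - 1 then kM
        else PySem.Int.floordiv (PySem.List.pyGetD (zs.map (fun z => pvRootA z)) i 0 + PySem.List.pyGetD (zs.map (fun z => pvRootA z)) (i + 1) 0) 2
      (((PySem.Dict.mk zone).insert "lokey" (max km (min low_key kM))).insert
          "hikey" (max km (min high_key kM))).items)) =
    (match zs with
     | [] => []
     | z :: rest => pvSweep km kM km z rest) := by
  match zs with
  | [] => simp [PySem.List.enumerate]
  | z :: rest =>
    rw [PySem.List.enumerate_eq_zipIdx_map]
    apply List.ext_getElem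
    · simp [pvSweep_length]
    · intro j hj1 hj2
      have hjz : j < rest.length + 1 := by simpa using hj1
      have hget : ∀ (k : Nat), k < rest.length + 1 → ∀ (i : Int), i = (k : Int) →
          PySem.List.pyGetD ((z :: rest).map (fun w => pvRootA w)) i 0 = pvRootAt (z :: rest) k := by
        intro k hk i hi
        subst hi
        have hkr : k < ((z :: rest).map (fun w => pvRootA w)).length := by simpa using hk
        rw [PySem.List.pyGetD_eq_getElem _ 0 (by positivity) (by exact_mod_cast hkr)]
        have hkl : k < (z :: rest).length := by simpa using hk
        simp only [List.getElem_map, pvRootAt]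
        congr 1
        exact (List.getD_eq_getElem _ _ hkl).symm
      simp only [List.getElem_map, List.getElem_zipIdx, zero_add]
      rw [pvSweep_getElem km kM rest z km j hjz]
      have hrlen : ((z :: rest).map (fun w => pvRootA w)).length = rest.length + 1 := by simp
      have hlo : (if (j : Int) = 0 then km
          else PySem.Int.floordiv (PySem.List.pyGetD ((z :: rest).map (fun w => pvRootA w)) ((j : Int) - 1) 0 + PySem.List.pyGetD ((z :: rest).map (fun w => pvRootA w)) (j : Int) 0) 2 + 1)
          = (if j = 0 then km
          else PySem.Int.floordiv (pvRootAt (z :: rest) (j - 1) + pvRootAt (z :: rest) j) 2 + 1) := by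
        by_cases h0 : j = 0
        · subst h0; simp
        · rw [if_neg (by exact_mod_cast h0), if_neg h0]
          rw [hget (j - 1) (by omega) _ (by omega), hget j hjz _ rfl]
      have hhi : (if (j : Int) = (((z :: rest).map (fun w => pvRootA w)).length : Int) - 1 then kM
          else PySem.Int.floordiv (PySem.List.pyGetD ((z :: rest).map (fun w => pvRootA w)) (j : Int) 0 + PySem.List.pyGetD ((z :: rest).map (fun w => pvRootA w)) ((j : Int) + 1) 0) 2)
          = (if j = rest.length then kM
          else PySem.Int.floordiv (pvRootAt (z :: rest) j + pvRootAt (z :: rest) (j + 1)) 2) := by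
        by_cases hl : j = rest.length
        · rw [if_pos (by rw [hrlen]; omega), if_pos hl]
        · rw [if_neg (by rw [hrlen]; omega), if_neg hl]
          rw [hget j hjz _ rfl, hget (j + 1) (by omega) _ (by push_cast; ring)]
      rw [hlo, hhi]
      simp only [pvSetKeys]
      rw [List.getD_eq_getElem _ _ (show j < (z :: rest).length by simpa using hjz)]

theorem main_eq (zones : List (List (String × Int))) (key_min key_max : Int) :
    assign_key_ranges zones key_min key_max = assign_key_ranges_alt zones key_min key_max := by
  unfold assign_key_ranges assign_key_ranges_alt
  exact mapA_eq_sweep key_min key_max (PySem.List.sorted zones (fun z => pvRootA z) false)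

-- ===== VERDICT =====
theorem assign_key_ranges_spec : Claim_equal_assign_key_ranges := by
  intro zones km kM _
  exact main_eq zones km kM
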